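-- pv_equiv track=rewrite | github.com/albertwcheng/albert-bioinformatics-scripts | motifEnrichment.py | constructFactorialTable
-- ===== SOURCE A (Python) =====
-- def constructFactorialTable(FactTable,lower,upper):
--
-- 	cur=1
-- 	for i in range(lower,upper+1):
-- 		if lower<=1:
-- 			FactTable.append(1)
-- 		else:
-- 			cur*=i
-- 			FactTable.append(cur)
--
-- 	return FactTable
-- ===== SOURCE B (Python) =====
-- def constructFactorialTable(FactTable, lower, upper):
--     if lower <= 1:
--         FactTable += [1] * max(0, upper + 1 - lower)
--     else:
--         # different algorithm: one pass to take the whole product, then a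
--         # back-to-front pass peeling factors off by exact division
--         total = 1
--         for i in range(lower, upper + 1):
--             total *= i
--         out = []
--         for i in reversed(range(lower, upper + 1)):
--             out.append(total)
--             total //= i
--         out.reverse()
--         FactTable += out
--     return FactTable
-- ===== Notes on version B (the rewrite author's own statement) =====
-- stated objective: alternative
-- what changed: Instead of one forward pass keeping a running product, B hoists the lower<=1 test out (list repetition), and otherwise computes the whole product of the range once and then rebuilds the table back-to-front by peeling factors off with exact integer division, reversing at the end.
import Mathlib
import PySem

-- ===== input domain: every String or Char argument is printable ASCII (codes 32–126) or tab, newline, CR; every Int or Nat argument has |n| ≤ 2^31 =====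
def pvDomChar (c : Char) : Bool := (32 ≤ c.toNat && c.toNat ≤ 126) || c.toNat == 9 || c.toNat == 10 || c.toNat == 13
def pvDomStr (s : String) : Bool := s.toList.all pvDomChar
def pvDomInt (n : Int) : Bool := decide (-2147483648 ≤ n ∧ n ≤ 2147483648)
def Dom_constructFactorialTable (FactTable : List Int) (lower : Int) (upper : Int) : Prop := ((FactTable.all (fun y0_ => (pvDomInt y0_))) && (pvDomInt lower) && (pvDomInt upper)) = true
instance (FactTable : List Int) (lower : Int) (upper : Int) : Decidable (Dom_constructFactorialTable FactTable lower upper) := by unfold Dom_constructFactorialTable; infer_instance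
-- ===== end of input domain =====

-- B replaces the running-product loop by: whole-range product once, then a back-to-front pass peeling factors off by exact division (alternative decomposition; same in-place mutation of FactTable).


-- ===== PORT A =====
def constructFactorialTable (FactTable : List Int) (lower : Int) (upper : Int) : List Int :=
  ((PySem.List.pyRange lower (upper + 1) 1).foldl
    (fun (s : Int × List Int) i =>
      if lower ≤ 1 then (s.1, s.2 ++ [1]) else (s.1 * i, s.2 ++ [s.1 * i]))
    (1, FactTable)).2

-- ===== PORT B =====
def constructFactorialTable_alt (FactTable : List Int) (lower : Int) (upper : Int) : List Int :=
  if lower ≤ 1 then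
    FactTable ++ List.replicate (max 0 (upper + 1 - lower)).toNat 1
  else
    -- total = product of range(lower, upper+1)
    let r := PySem.List.pyRange lower (upper + 1) 1
    let total := r.foldl (· * ·) 1
    -- back-to-front pass: for i in reversed(range(...)): out.append(total); total //= i
    let p := r.reverse.foldl
      (fun (s : Int × List Int) i => (PySem.Int.floordiv s.1 i, s.2 ++ [s.1])) (total, [])
    FactTable ++ p.2.reverse

-- ===== PRECONDITION & SPEC =====
def Spec_constructFactorialTable (FactTable : List Int) (lower : Int) (upper : Int) (out : List Int) : Prop := out = constructFactorialTable_alt FactTable lower upper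
instance (FactTable : List Int) (lower : Int) (upper : Int) (out : List Int) : Decidable (Spec_constructFactorialTable FactTable lower upper out) := by unfold Spec_constructFactorialTable; infer_instance

-- ===== CLAIM =====
def Claim_equal_constructFactorialTable : Prop := ∀ (FactTable : List Int) (lower : Int) (upper : Int), Dom_constructFactorialTable FactTable lower upper → Spec_constructFactorialTable FactTable lower upper (constructFactorialTable FactTable lower upper)

-- ===== LEMMAS AND PROOFS =====
-- prefix products of xs scaled by cur (the values A appends in its else branch)
def pvAccumMul (cur : Int) (xs : List Int) : List Int :=
  match xs with
  | [] => []
  | x :: rest => (cur * x) :: pvAccumMul (cur * x) rest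

lemma foldl_ones (r : List Int) :
    ∀ (cur : Int) (t : List Int),
      (r.foldl (fun (s : Int × List Int) (_ : Int) => (s.1, s.2 ++ [1])) (cur, t)).2
      = t ++ List.replicate r.length 1 := by
  induction r with
  | nil => intro cur t; simp
  | cons x xs ih =>
      intro cur t
      simp only [List.foldl_cons, List.length_cons, List.replicate_succ]
      rw [ih]
      simp

lemma foldl_mul (r : List Int) :
    ∀ (cur : Int) (t : List Int),
      (r.foldl (fun (s : Int × List Int) (i : Int) => (s.1 * i, s.2 ++ [s.1 * i])) (cur, t)).2
      = t ++ pvAccumMul cur r := by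
  induction r with
  | nil => intro cur t; simp [pvAccumMul]
  | cons x xs ih =>
      intro cur t
      simp only [List.foldl_cons, pvAccumMul]
      rw [ih]
      simp

lemma accumMul_append_singleton (ys : List Int) :
    ∀ (cur y : Int),
      pvAccumMul cur (ys ++ [y]) = pvAccumMul cur ys ++ [(ys.foldl (· * ·) cur) * y] := by
  induction ys with
  | nil => intro cur y; simp [pvAccumMul]
  | cons x xs ih =>
      intro cur y
      simp only [List.cons_append, pvAccumMul, List.foldl_cons]
      rw [ih]

-- the back-to-front division pass, started at the full product, rebuilds the prefix products reversed
lemma backpass (xs : List Int) (hnz : ∀ x ∈ xs, x ≠ 0) :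
    ∀ (acc : List Int),
      ((xs.reverse.foldl
        (fun (s : Int × List Int) i => (PySem.Int.floordiv s.1 i, s.2 ++ [s.1]))
        (xs.foldl (· * ·) 1, acc)).2)
      = acc ++ (pvAccumMul 1 xs).reverse := by
  induction xs using List.reverseRecOn with
  | nil => intro acc; simp [pvAccumMul]
  | append_singleton ys y ih =>
      intro acc
      have hy : y ≠ 0 := hnz y (by simp)
      have hys : ∀ x ∈ ys, x ≠ 0 := fun x hx => hnz x (by simp [hx])
      have hprod : PySem.Int.floordiv ((ys.foldl (· * ·) 1) * y) y = ys.foldl (· * ·) 1 := by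
        simp [PySem.Int.floordiv, Int.mul_fdiv_cancel _ hy]
      rw [List.reverse_append]
      simp only [List.reverse_singleton, List.singleton_append, List.foldl_cons,
        List.foldl_append, List.foldl_cons, List.foldl_nil]
      rw [hprod, ih hys]
      rw [accumMul_append_singleton]
      simp

-- ===== VERDICT =====
theorem constructFactorialTable_spec : Claim_equal_constructFactorialTable := by
  intro FactTable lower upper _
  unfold Spec_constructFactorialTable constructFactorialTable constructFactorialTable_alt
  by_cases h : lower ≤ 1
  · simp only [if_pos h]
    rw [foldl_ones, PySem.List.length_pyRange_one]
    congr 2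
    omega
  · simp only [if_neg h]
    rw [foldl_mul]
    have hnz : ∀ x ∈ PySem.List.pyRange lower (upper + 1) 1, x ≠ 0 := by
      intro x hx
      rw [PySem.List.mem_pyRange_one] at hx
      omega
    rw [backpass _ hnz []]
    simp
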